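-- pv_equiv track=rewrite | github.com/The-Gopher/advent-of-code-2024 | src/aoc24/day8/step2.py | find_antennas
-- ===== SOURCE A (Python) =====
-- from itertools import combinations, groupby, pairwise
--
-- def find_antennas(map: list[str]) -> dict[str, list[tuple[int, int]]]:
--     antennas = []
--     for y, line in enumerate(map):
--         for x, char in enumerate(line):
--             if char != ".":
--                 antennas.append((char, x, y))
--     return {
--         f: [(x, y) for f, x, y in v]
--         for f, v in groupby(sorted(antennas), key=lambda x: x[0])
--     }
-- ===== SOURCE B (Python) =====
-- def find_antennas(map: list[str]) -> dict[str, list[tuple[int, int]]]: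
--     grouped = {}
--     for y, line in enumerate(map):
--         for x, char in enumerate(line):
--             if char != ".":
--                 grouped.setdefault(char, []).append((x, y))
--     return {f: sorted(grouped[f]) for f in sorted(grouped)}
-- ===== Notes on version B (the rewrite author's own statement) =====
-- stated objective: idiomatic
-- what changed: B buckets antenna coordinates into a dict keyed by frequency during the single grid scan and then sorts each bucket (and the keys) separately, instead of A's global sort of all (char,x,y) triples followed by itertools.groupby.
import Mathlib
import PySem

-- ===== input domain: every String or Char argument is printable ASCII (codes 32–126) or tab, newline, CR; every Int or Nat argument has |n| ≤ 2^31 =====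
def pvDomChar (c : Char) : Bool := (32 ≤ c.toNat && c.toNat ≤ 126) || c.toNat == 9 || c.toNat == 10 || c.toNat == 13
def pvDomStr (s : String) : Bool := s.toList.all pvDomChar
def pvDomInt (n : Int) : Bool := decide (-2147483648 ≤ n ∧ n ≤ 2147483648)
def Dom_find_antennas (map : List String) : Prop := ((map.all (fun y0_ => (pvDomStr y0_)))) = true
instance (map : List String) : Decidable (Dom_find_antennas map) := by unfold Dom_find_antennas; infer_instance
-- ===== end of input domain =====

-- B groups coordinates per frequency in one dict pass and sorts each bucket, instead of A's
-- global sort of all (char, x, y) triples followed by itertools.groupby (objective: idiomatic).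

-- Python compares tuples lexicographically; these injective keys give exactly that order.
def pvPairKey (p : Int × Int) : Lex (Int × Int) := toLex p
def pvTripKey (t : String × Int × Int) : Lex (String × Lex (Int × Int)) := toLex (t.1, toLex t.2)

-- ===== PORT A =====
-- itertools.groupby over a list of (char, x, y) triples, paired with the dict comprehension
-- '{f: [(x, y) for f, x, y in v] for f, v in groupby(..)}': consecutive run of equal first
-- components becomes one (f, coords) entry.  (On the sorted list A feeds it, equal keys are
-- adjacent and the comprehension's keys are distinct, so the dict is this assoc list.)
def pvGroupby : List (String × Int × Int) → List (String × List (Int × Int))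
  | [] => []
  | t :: rest =>
    (t.1, (t :: rest.takeWhile (fun u => u.1 == t.1)).map (·.2)) ::
      pvGroupby (rest.dropWhile (fun u => u.1 == t.1))
  termination_by l => l.length
  decreasing_by
    simp only [List.length_cons]
    exact Nat.lt_succ_of_le (List.length_dropWhile_le _ _)

-- 'char != "."' compares 1-character strings; 'sorted(antennas)' sorts 3-tuples by Python's
-- lexicographic tuple order, ported exactly as PySem.List.sorted with the injective key pvTripKey.
def find_antennas (map : List String) : List (String × List (Int × Int)) :=
  let antennas : List (String × Int × Int) :=
    (PySem.List.enumerate map).foldl (fun acc yl =>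
      (PySem.List.enumerate yl.2.toList).foldl (fun acc xc =>
        if String.ofList [xc.2] != "." then acc ++ [(String.ofList [xc.2], xc.1, yl.1)] else acc) acc) []
  pvGroupby (PySem.List.sorted antennas pvTripKey false)

-- ===== PORT B =====
-- 'grouped.setdefault(char, []).append((x, y))' is Dict.modify char [] (· ++ [(x, y)]);
-- 'grouped[f]' for f in grouped.keys is Dict.getD f [] (the key is present, so exact);
-- 'sorted(grouped[f])' sorts (x, y) 2-tuples lexicographically: PySem.List.sorted with pvPairKey.
def find_antennas_alt (map : List String) : List (String × List (Int × Int)) :=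
  let grouped : PySem.Dict String (List (Int × Int)) :=
    (PySem.List.enumerate map).foldl (fun d yl =>
      (PySem.List.enumerate yl.2.toList).foldl (fun d xc =>
        if String.ofList [xc.2] != "." then
          PySem.Dict.modify d (String.ofList [xc.2]) [] (· ++ [(xc.1, yl.1)])
        else d) d) PySem.Dict.empty
  (PySem.List.sorted (PySem.Dict.keys grouped) (fun k => k) false).map
    (fun f => (f, PySem.List.sorted (PySem.Dict.getD grouped f []) pvPairKey false))

-- ===== PRECONDITION & SPEC =====
def Spec_find_antennas (map : List String) (out : List (String × List (Int × Int))) : Prop := out = find_antennas_alt map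
instance (map : List String) (out : List (String × List (Int × Int))) : Decidable (Spec_find_antennas map out) := by unfold Spec_find_antennas; infer_instance

-- ===== CLAIM (what is proved, stated in full; the proofs are below) =====
def Claim_equal_find_antennas : Prop := ∀ (map : List String), Dom_find_antennas map → Spec_find_antennas map (find_antennas map)

-- ===== LEMMAS AND PROOFS =====

-- the antennas of the grid, in scan order, as one canonical list of triples
def pvTrips (map : List String) : List (String × Int × Int) :=
  (PySem.List.enumerate map).flatMap (fun yl =>
    ((PySem.List.enumerate yl.2.toList).filter (fun xc => String.ofList [xc.2] != ".")).map
      (fun xc => (String.ofList [xc.2], xc.1, yl.1)))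

theorem pvTripKey_inj : Function.Injective pvTripKey := by
  intro a b h
  unfold pvTripKey at h
  have h' := toLex.injective h
  have h1 : a.1 = b.1 := congrArg Prod.fst h'
  have h2 : a.2 = b.2 := toLex.injective (congrArg Prod.snd h')
  exact Prod.ext h1 h2

theorem pvPairKey_inj : Function.Injective pvPairKey := fun _ _ h => toLex.injective h

theorem pvA_scan (map : List String) :
    (PySem.List.enumerate map).foldl (fun acc yl =>
      (PySem.List.enumerate yl.2.toList).foldl (fun acc xc =>
        if String.ofList [xc.2] != "." then acc ++ [(String.ofList [xc.2], xc.1, yl.1)] else acc) acc) []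
    = pvTrips map := by
  simp only [PySem.List.foldl_append_if, PySem.List.foldl_append_eq_flatMap, pvTrips,
    List.nil_append]

theorem pvB_scan (map : List String) :
    (PySem.List.enumerate map).foldl (fun d yl =>
      (PySem.List.enumerate yl.2.toList).foldl (fun d xc =>
        if String.ofList [xc.2] != "." then
          PySem.Dict.modify d (String.ofList [xc.2]) [] (· ++ [(xc.1, yl.1)])
        else d) d) PySem.Dict.empty
    = (pvTrips map).foldl (fun d t => PySem.Dict.modify d t.1 [] (· ++ [t.2])) PySem.Dict.empty := by
  simp only [pvTrips, List.foldl_flatMap, PySem.List.foldl_if_eq_foldl_filter, List.foldl_map]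

-- partition permutation: flatMapping the filters over a nodup cover of the keys is a permutation
theorem pvPerm_flatMap_filter (L : List (String × Int × Int)) (K : List String)
    (hnd : K.Nodup) (hcov : ∀ t ∈ L, t.1 ∈ K) :
    (K.flatMap (fun f => L.filter (fun t => t.1 == f))).Perm L := by
  induction K generalizing L with
  | nil =>
    have hL : L = [] := List.eq_nil_iff_forall_not_mem.mpr (fun t ht => by simpa using hcov t ht)
    simp [hL]
  | cons f K' ih =>
    rw [List.flatMap_cons]
    have hf : f ∉ K' := (List.nodup_cons.mp hnd).1
    have hnd' : K'.Nodup := (List.nodup_cons.mp hnd).2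
    have hrw : K'.flatMap (fun g => L.filter (fun t => t.1 == g))
        = K'.flatMap (fun g => (L.filter (fun t => !(t.1 == f))).filter (fun t => t.1 == g)) := by
      apply List.flatMap_congr
      intro g hg
      rw [List.filter_filter]
      apply List.filter_congr
      intro t _
      by_cases htg : t.1 = g
      · have hgf' : (g == f) = false := by
          simp only [beq_eq_false_iff_ne, ne_eq]
          exact fun hh => hf (hh ▸ hg)
        simp [htg, hgf']
      · simp [htg]
    rw [hrw]
    have hcov' : ∀ t ∈ L.filter (fun t => !(t.1 == f)), t.1 ∈ K' := by
      intro t ht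
      have hm := List.mem_of_mem_filter ht
      have hp := List.of_mem_filter ht
      have := hcov t hm
      simp only [List.mem_cons] at this
      rcases this with h | h
      · simp [h] at hp
      · exact h
    have hperm' := ih (L.filter (fun t => !(t.1 == f))) hnd' hcov'
    exact List.Perm.trans (List.Perm.append (List.Perm.refl _) hperm')
      (List.filter_append_perm _ L)

theorem pvPerm_flatMap_sorted (K : List String) (L : List (String × Int × Int)) :
    (K.flatMap (fun f => PySem.List.sorted (L.filter (fun t => t.1 == f)) pvTripKey false)).Perm
      (K.flatMap (fun f => L.filter (fun t => t.1 == f))) := by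
  induction K with
  | nil => simp
  | cons f K' ih =>
    rw [List.flatMap_cons, List.flatMap_cons]
    exact List.Perm.append (PySem.List.sorted_perm _ _ _) ih

theorem pvPairwise_flatMap (K : List String) (L : List (String × Int × Int))
    (hK : K.Pairwise (· < ·)) :
    (K.flatMap (fun f => PySem.List.sorted (L.filter (fun t => t.1 == f)) pvTripKey false)).Pairwise
      (fun a b => pvTripKey a ≤ pvTripKey b) := by
  induction K with
  | nil => simp
  | cons f K' ih =>
    rw [List.flatMap_cons, List.pairwise_append]
    refine ⟨PySem.List.sorted_pairwise _ _, ih (List.pairwise_cons.mp hK).2, ?_⟩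
    intro a ha b hb
    have haf : a.1 = f := by
      rw [PySem.List.mem_sorted] at ha
      simpa using List.of_mem_filter ha
    obtain ⟨g, hg, hbg⟩ := List.mem_flatMap.mp hb
    have hbg1 : b.1 = g := by
      rw [PySem.List.mem_sorted] at hbg
      simpa using List.of_mem_filter hbg
    have hfg : f < g := (List.pairwise_cons.mp hK).1 g hg
    unfold pvTripKey
    rw [Prod.Lex.toLex_le_toLex]
    left
    simpa [haf, hbg1] using hfg

-- the sorted triple list is the concatenation of the per-frequency sorted blocks
theorem pvSorted_eq_flatMap (L : List (String × Int × Int)) :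
    PySem.List.sorted L pvTripKey false
      = (PySem.List.sorted (PySem.Set.ofList (L.map (·.1))) (fun k => k) false).flatMap
          (fun f => PySem.List.sorted (L.filter (fun t => t.1 == f)) pvTripKey false) := by
  set K := PySem.List.sorted (PySem.Set.ofList (L.map (·.1))) (fun k => k) false with hKdef
  have hKlt : K.Pairwise (· < ·) := PySem.List.sorted_ofList_pairwise_lt _
  have hKnd : K.Nodup := hKlt.imp (fun h => ne_of_lt h)
  have hcov : ∀ t ∈ L, t.1 ∈ K := by
    intro t ht
    rw [hKdef, PySem.List.mem_sorted, PySem.Set.mem_ofList]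
    exact List.mem_map_of_mem ht
  apply PySem.List.eq_of_perm_of_pairwise_le_of_injective pvTripKey pvTripKey_inj
  · exact (PySem.List.sorted_perm _ _ _).trans
      ((pvPerm_flatMap_filter L K hKnd hcov).symm.trans (pvPerm_flatMap_sorted K L).symm)
  · exact PySem.List.sorted_pairwise _ _
  · exact pvPairwise_flatMap K L hKlt

theorem pvTakeWhile_all {α : Type} (p : α → Bool) (xs ys : List α)
    (h1 : ∀ x ∈ xs, p x = true) (h2 : ∀ y ∈ ys, p y = false) :
    (xs ++ ys).takeWhile p = xs := by
  induction xs with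
  | nil =>
    cases ys with
    | nil => rfl
    | cons y ys => simp [h2 y (by simp)]
  | cons x xs ih =>
    simp only [List.cons_append, List.takeWhile_cons, h1 x (by simp), if_true]
    rw [ih (fun a ha => h1 a (by simp [ha]))]

theorem pvDropWhile_all {α : Type} (p : α → Bool) (xs ys : List α)
    (h1 : ∀ x ∈ xs, p x = true) (h2 : ∀ y ∈ ys, p y = false) :
    (xs ++ ys).dropWhile p = ys := by
  induction xs with
  | nil =>
    cases ys with
    | nil => rfl
    | cons y ys => simp [h2 y (by simp)]
  | cons x xs ih =>
    simp only [List.cons_append, List.dropWhile_cons, h1 x (by simp), if_true]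
    exact ih (fun a ha => h1 a (by simp [ha]))

-- groupby of a concatenation of nonempty constant-key blocks with strictly increasing keys
theorem pvGroupby_flatMap (K : List String) (g : String → List (String × Int × Int))
    (hK : K.Pairwise (· < ·))
    (hne : ∀ f ∈ K, g f ≠ [])
    (hkey : ∀ f ∈ K, ∀ t ∈ g f, t.1 = f) :
    pvGroupby (K.flatMap g) = K.map (fun f => (f, (g f).map (·.2))) := by
  induction K with
  | nil => simp [pvGroupby]
  | cons f K' ih =>
    rw [List.flatMap_cons]
    obtain ⟨t, run, hgf⟩ : ∃ t run, g f = t :: run := by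
      cases h : g f with
      | nil => exact absurd h (hne f (by simp))
      | cons a l => exact ⟨a, l, rfl⟩
    have htf : t.1 = f := hkey f (by simp) t (by simp [hgf])
    have hrun : ∀ u ∈ run, (fun u => u.1 == t.1) u = true := by
      intro u hu
      have := hkey f (by simp) u (by simp [hgf, hu])
      simp [this, htf]
    have hrest : ∀ u ∈ K'.flatMap g, (fun u => u.1 == t.1) u = false := by
      intro u hu
      obtain ⟨c, hc, huc⟩ := List.mem_flatMap.mp hu
      have hu1 : u.1 = c := hkey c (by simp [hc]) u huc
      have hfc : f < c := (List.pairwise_cons.mp hK).1 c hc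
      simp only [beq_eq_false_iff_ne, ne_eq, hu1, htf]
      exact fun h => absurd (h ▸ hfc) (lt_irrefl _)
    rw [hgf, List.cons_append, pvGroupby,
      pvTakeWhile_all _ run (K'.flatMap g) hrun hrest,
      pvDropWhile_all _ run (K'.flatMap g) hrun hrest,
      ih (List.pairwise_cons.mp hK).2
        (fun c hc => hne c (List.mem_cons_of_mem _ hc))
        (fun c hc => hkey c (List.mem_cons_of_mem _ hc))]
    simp [hgf, htf]

-- sorting the triples of a constant-frequency block and dropping the frequency is sorting the coordinates
theorem pvSorted_map_snd (l : List (String × Int × Int)) (f : String) (h : ∀ t ∈ l, t.1 = f) :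
    (PySem.List.sorted l pvTripKey false).map (·.2)
      = PySem.List.sorted (l.map (·.2)) pvPairKey false := by
  apply PySem.List.eq_of_perm_of_pairwise_le_of_injective pvPairKey pvPairKey_inj
  · exact (List.Perm.map _ (PySem.List.sorted_perm _ _ _)).trans
      (PySem.List.sorted_perm _ _ _).symm
  · have hs := PySem.List.sorted_pairwise l pvTripKey
    have hs2 : (PySem.List.sorted l pvTripKey false).Pairwise
        (fun a b => pvPairKey a.2 ≤ pvPairKey b.2) := by
      refine List.Pairwise.imp_of_mem ?_ hs
      intro a b ha hb hab
      have ha1 : a.1 = f := h a (by rwa [PySem.List.mem_sorted] at ha)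
      have hb1 : b.1 = f := h b (by rwa [PySem.List.mem_sorted] at hb)
      unfold pvTripKey at hab
      rw [Prod.Lex.toLex_le_toLex] at hab
      rcases hab with hlt | ⟨_, hle⟩
      · rw [ha1, hb1] at hlt
        exact absurd hlt (lt_irrefl _)
      · exact hle
    exact List.pairwise_map.mpr hs2
  · exact PySem.List.sorted_pairwise _ _

-- ===== VERDICT (by name: the statement is the Claim_ definition above) =====
theorem find_antennas_spec : Claim_equal_find_antennas := by
  intro map _
  unfold Spec_find_antennas
  simp only [find_antennas, find_antennas_alt]
  rw [pvA_scan, pvB_scan]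
  have hkeys : ((pvTrips map).foldl
      (fun d t => PySem.Dict.modify d t.1 [] (· ++ [t.2])) PySem.Dict.empty).keys
      = PySem.Set.ofList ((pvTrips map).map (·.1)) := by
    rw [PySem.Dict.keys_foldl_modify_key (pvTrips map) (fun t => t.1) []
      (fun _ t => (· ++ [t.2])) PySem.Dict.empty]
    simp [PySem.Set.update_nil_left]
  have hgetD : ∀ f, PySem.Dict.getD ((pvTrips map).foldl
      (fun d t => PySem.Dict.modify d t.1 [] (· ++ [t.2])) PySem.Dict.empty) f []
      = ((pvTrips map).filter (fun t => t.1 == f)).map (·.2) := by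
    intro f
    rw [PySem.Dict.getD_foldl_modify_append]
    simp
  rw [pvSorted_eq_flatMap (pvTrips map), hkeys]
  have hKlt : (PySem.List.sorted (PySem.Set.ofList ((pvTrips map).map (·.1)))
      (fun k => k) false).Pairwise (· < ·) := PySem.List.sorted_ofList_pairwise_lt _
  rw [pvGroupby_flatMap _ _ hKlt]
  · apply List.map_congr_left
    intro f hf
    rw [hgetD f, pvSorted_map_snd _ f]
    intro t ht
    simpa using List.of_mem_filter ht
  · intro f hf
    rw [PySem.List.mem_sorted, PySem.Set.mem_ofList, List.mem_map] at hf
    obtain ⟨t, ht, hft⟩ := hf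
    rw [ne_eq, PySem.List.sorted_eq_nil_iff]
    intro hnil
    have : t ∈ (pvTrips map).filter (fun u => u.1 == f) :=
      List.mem_filter.mpr ⟨ht, by simp [hft]⟩
    rw [hnil] at this
    exact absurd this (List.not_mem_nil)
  · intro f hf t ht
    rw [PySem.List.mem_sorted] at ht
    simpa using List.of_mem_filter ht
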